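-- pv_equiv track=rewrite | github.com/sudhanva15/invest_ai | core/recommendation_engine.py | _filter_preserve_universe
-- ===== SOURCE A (Python) =====
-- from typing import Callable, Optional, Union, List, Dict, TypedDict
--
-- def _class_of_symbol(symbol: str, catalog: dict) -> str:
--     try:
--         for a in catalog.get("assets", []):
--             if str(a.get("symbol", "")).upper() == str(symbol).upper():
--                 return str(a.get("class", "unknown"))
--     except Exception:
--         pass
--     # Heuristic fallbacks for common tickers
--     s = str(symbol).upper()
--     if s in {"DBC", "GSG"}:
--         return "commodities"
--     if s in {"GLD", "IAU"}:
--         return "commodities"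
--     if s in {"SPY", "VTI", "QQQ", "DIA", "IWM", "VEA", "VXUS", "VWO", "EFA"}:
--         return "equity_us"
--     if s in {"TLT", "IEF"}:
--         return "bonds_tsy"
--     if s in {"BND", "LQD"}:
--         return "bonds_ig"
--     if s in {"MUB"}:
--         return "munis"
--     if s in {"BIL", "SHY"}:
--         return "cash"
--     return "unknown"
--
-- def _filter_preserve_universe(symbols: List[str], catalog: dict) -> List[str]:
--     """Prefer cash, short-term bonds, high-quality bonds for capital preservation."""
--     preserve_classes = {"tbills", "treasury_short", "corporate_bond", "tax_eff_muni"}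
--     safe_etfs = {"BIL", "SHY", "BND", "LQD", "MUB", "GOVT"}
--
--     filtered = []
--     for sym in symbols:
--         asset_class = _class_of_symbol(sym, catalog)
--         if asset_class in preserve_classes or sym.upper() in safe_etfs:
--             filtered.append(sym)
--         # Minimal equity exposure
--         elif asset_class == "public_equity" and len([s for s in filtered if _class_of_symbol(s, catalog) == "public_equity"]) < 1:
--             filtered.append(sym)
--
--     return filtered if filtered else symbols
-- ===== SOURCE B (Python) =====
-- # Heuristic fallback classes as a single lookup table (catalog entries take precedence).
-- _FALLBACK = {
--     "DBC": "commodities", "GSG": "commodities", "GLD": "commodities", "IAU": "commodities",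
--     "SPY": "equity_us", "VTI": "equity_us", "QQQ": "equity_us", "DIA": "equity_us",
--     "IWM": "equity_us", "VEA": "equity_us", "VXUS": "equity_us", "VWO": "equity_us",
--     "EFA": "equity_us", "TLT": "bonds_tsy", "IEF": "bonds_tsy", "BND": "bonds_ig",
--     "LQD": "bonds_ig", "MUB": "munis", "BIL": "cash", "SHY": "cash",
-- }
--
--
-- def _build_table(catalog):
--     """Index the catalog once: UPPER(symbol) -> class, first entry wins."""
--     table = {}
--     for a in catalog.get("assets", []):
--         table.setdefault(str(a.get("symbol", "")).upper(), str(a.get("class", "unknown")))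
--     return table
--
--
-- def _class_lookup(table, sym):
--     u = str(sym).upper()
--     if u in table:
--         return table[u]
--     return _FALLBACK.get(u, "unknown")
--
--
-- def _filter_preserve_universe(symbols, catalog):
--     """Index the catalog once, then one pass with a seen-equity flag
--     (instead of rescanning and reclassifying the accumulator)."""
--     table = _build_table(catalog)
--     filtered = []
--     have_equity = False
--     for sym in symbols:
--         c = _class_lookup(table, sym)
--         if c in ("tbills", "treasury_short", "corporate_bond", "tax_eff_muni") \
--                 or sym.upper() in ("BIL", "SHY", "BND", "LQD", "MUB", "GOVT"):
--             filtered.append(sym)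
--             have_equity = have_equity or c == "public_equity"
--         elif c == "public_equity" and not have_equity:
--             filtered.append(sym)
--             have_equity = True
--     return filtered if filtered else symbols
-- ===== Notes on version B (the rewrite author's own statement) =====
-- stated objective: alternative
-- what changed: B indexes the catalog once into a first-wins dict (UPPER symbol -> class, heuristics folded into a lookup table) and runs a single pass carrying a seen-equity flag, instead of A's per-symbol linear catalog scan and rescanning/reclassifying the accumulated list at every equity candidate.
import Mathlib
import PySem

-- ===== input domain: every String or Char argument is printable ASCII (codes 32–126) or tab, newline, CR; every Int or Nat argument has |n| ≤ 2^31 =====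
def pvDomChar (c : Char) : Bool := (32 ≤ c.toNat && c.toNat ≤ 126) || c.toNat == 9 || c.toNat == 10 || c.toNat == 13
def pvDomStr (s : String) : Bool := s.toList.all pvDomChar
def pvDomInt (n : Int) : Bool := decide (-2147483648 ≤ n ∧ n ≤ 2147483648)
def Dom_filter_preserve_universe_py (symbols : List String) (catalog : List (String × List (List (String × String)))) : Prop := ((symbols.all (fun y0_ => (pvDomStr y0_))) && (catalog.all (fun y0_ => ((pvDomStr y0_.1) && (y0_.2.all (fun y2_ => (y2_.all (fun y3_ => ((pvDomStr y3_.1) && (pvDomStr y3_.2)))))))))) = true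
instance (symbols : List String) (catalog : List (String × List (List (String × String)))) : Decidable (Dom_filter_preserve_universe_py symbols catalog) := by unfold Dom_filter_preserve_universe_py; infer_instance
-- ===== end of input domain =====

-- B indexes the catalog once into a first-wins dict (heuristics folded into a lookup table)
-- and runs one pass with a seen-equity flag instead of A's per-symbol catalog scan and
-- accumulator rescans; objective: alternative (not measured faster).

-- ===== PORT A =====
-- port of the same-module helper _class_of_symbol (used only by A)
def classOfSym (symbol : String) (catalog : List (String × List (List (String × String)))) : String :=
  match (PySem.Dict.getD (PySem.Dict.mk catalog) "assets" []).find?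
      (fun a => PySem.Str.upper (PySem.Dict.getD (PySem.Dict.mk a) "symbol" "") == PySem.Str.upper symbol) with
  | some a => PySem.Dict.getD (PySem.Dict.mk a) "class" "unknown"
  | none =>
    let s := PySem.Str.upper symbol
    if PySem.Set.contains (PySem.Set.ofList ["DBC", "GSG"]) s then "commodities"
    else if PySem.Set.contains (PySem.Set.ofList ["GLD", "IAU"]) s then "commodities"
    else if PySem.Set.contains (PySem.Set.ofList ["SPY", "VTI", "QQQ", "DIA", "IWM", "VEA", "VXUS", "VWO", "EFA"]) s then "equity_us"
    else if PySem.Set.contains (PySem.Set.ofList ["TLT", "IEF"]) s then "bonds_tsy"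
    else if PySem.Set.contains (PySem.Set.ofList ["BND", "LQD"]) s then "bonds_ig"
    else if PySem.Set.contains (PySem.Set.ofList ["MUB"]) s then "munis"
    else if PySem.Set.contains (PySem.Set.ofList ["BIL", "SHY"]) s then "cash"
    else "unknown"

def preserveClasses : PySem.Set String := PySem.Set.ofList ["tbills", "treasury_short", "corporate_bond", "tax_eff_muni"]
def safeEtfs : PySem.Set String := PySem.Set.ofList ["BIL", "SHY", "BND", "LQD", "MUB", "GOVT"]

def filter_preserve_universe_py (symbols : List String) (catalog : List (String × List (List (String × String)))) : List String :=
  let filtered := symbols.foldl (fun filtered sym =>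
    let asset_class := classOfSym sym catalog
    if PySem.Set.contains preserveClasses asset_class || PySem.Set.contains safeEtfs (PySem.Str.upper sym) then
      filtered ++ [sym]
    else if asset_class == "public_equity"
        && decide ((filtered.filter (fun s => classOfSym s catalog == "public_equity")).length < 1) then
      filtered ++ [sym]
    else
      filtered) []
  if filtered.isEmpty then symbols else filtered

-- ===== PORT B =====
-- Source B's module-level _FALLBACK dict literal
def fallbackD : PySem.Dict String String := PySem.Dict.mk
  [("DBC", "commodities"), ("GSG", "commodities"), ("GLD", "commodities"), ("IAU", "commodities"),
   ("SPY", "equity_us"), ("VTI", "equity_us"), ("QQQ", "equity_us"), ("DIA", "equity_us"),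
   ("IWM", "equity_us"), ("VEA", "equity_us"), ("VXUS", "equity_us"), ("VWO", "equity_us"),
   ("EFA", "equity_us"), ("TLT", "bonds_tsy"), ("IEF", "bonds_tsy"), ("BND", "bonds_ig"),
   ("LQD", "bonds_ig"), ("MUB", "munis"), ("BIL", "cash"), ("SHY", "cash")]

-- Source B's _build_table: index the catalog once, UPPER(symbol) -> class, first entry wins
def buildTable (catalog : List (String × List (List (String × String)))) : PySem.Dict String String :=
  (PySem.Dict.getD (PySem.Dict.mk catalog) "assets" []).foldl
    (fun table a => table.setdefault (PySem.Str.upper (PySem.Dict.getD (PySem.Dict.mk a) "symbol" ""))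
        (PySem.Dict.getD (PySem.Dict.mk a) "class" "unknown"))
    PySem.Dict.empty

-- Source B's _class_lookup
def classLookup (table : PySem.Dict String String) (sym : String) : String :=
  let u := PySem.Str.upper sym
  match table.get? u with
  | some c => c
  | none => PySem.Dict.getD fallbackD u "unknown"

def filter_preserve_universe_py_alt (symbols : List String) (catalog : List (String × List (List (String × String)))) : List String :=
  let table := buildTable catalog
  let st := symbols.foldl (fun (st : List String × Bool) sym =>
    let c := classLookup table sym
    if ["tbills", "treasury_short", "corporate_bond", "tax_eff_muni"].contains c
        || ["BIL", "SHY", "BND", "LQD", "MUB", "GOVT"].contains (PySem.Str.upper sym) then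
      (st.1 ++ [sym], st.2 || (c == "public_equity"))
    else if c == "public_equity" && !st.2 then
      (st.1 ++ [sym], true)
    else
      st) ([], false)
  if st.1.isEmpty then symbols else st.1

-- ===== PRECONDITION & SPEC =====
def Spec_filter_preserve_universe_py (symbols : List String) (catalog : List (String × List (List (String × String)))) (out : List String) : Prop := out = filter_preserve_universe_py_alt symbols catalog
instance (symbols : List String) (catalog : List (String × List (List (String × String)))) (out : List String) : Decidable (Spec_filter_preserve_universe_py symbols catalog out) := by unfold Spec_filter_preserve_universe_py; infer_instance

-- ===== CLAIM (what is proved, stated in full; the proofs are below) =====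
def Claim_equal_filter_preserve_universe_py : Prop := ∀ (symbols : List String) (catalog : List (String × List (List (String × String)))), Dom_filter_preserve_universe_py symbols catalog → Spec_filter_preserve_universe_py symbols catalog (filter_preserve_universe_py symbols catalog)

-- ===== LEMMAS AND PROOFS =====

-- proof-only abbreviations for the two symbol tests, phrased with A's helper
def keepBase (catalog : List (String × List (List (String × String)))) (s : String) : Bool :=
  PySem.Set.contains preserveClasses (classOfSym s catalog) || PySem.Set.contains safeEtfs (PySem.Str.upper s)

def isEq (catalog : List (String × List (List (String × String)))) (s : String) : Bool :=
  classOfSym s catalog == "public_equity"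

-- reference result of the filtering phase: base keeps plus the first public_equity symbol
def keepFirst (catalog : List (String × List (List (String × String)))) : List String → List String
  | [] => []
  | s :: r =>
    if isEq catalog s then s :: r.filter (keepBase catalog)
    else if keepBase catalog s then s :: keepFirst catalog r
    else keepFirst catalog r

lemma countLt_iff (catalog : List (String × List (List (String × String)))) (acc : List String) :
    ((acc.filter (fun s => classOfSym s catalog == "public_equity")).length < 1)
      ↔ acc.any (isEq catalog) = false := by
  simp [List.length_eq_zero_iff, List.filter_eq_nil_iff, List.any_eq_false, isEq]

lemma foldA_eq (catalog : List (String × List (List (String × String)))) :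
    ∀ (l acc : List String),
      l.foldl (fun filtered sym =>
        let asset_class := classOfSym sym catalog
        if PySem.Set.contains preserveClasses asset_class || PySem.Set.contains safeEtfs (PySem.Str.upper sym) then
          filtered ++ [sym]
        else if asset_class == "public_equity"
            && decide ((filtered.filter (fun s => classOfSym s catalog == "public_equity")).length < 1) then
          filtered ++ [sym]
        else
          filtered) acc
      = acc ++ (if acc.any (isEq catalog) then l.filter (keepBase catalog) else keepFirst catalog l) := by
  intro l
  induction l with
  | nil => intro acc; cases h : acc.any (isEq catalog) <;> simp [keepFirst]
  | cons s r ih =>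
    intro acc
    rw [List.foldl_cons]
    by_cases hkb : keepBase catalog s
    · have hkb' : (PySem.Set.contains preserveClasses (classOfSym s catalog)
          || PySem.Set.contains safeEtfs (PySem.Str.upper s)) = true := hkb
      simp only [hkb', if_true, ih]
      cases hacc : acc.any (isEq catalog) with
      | true =>
        have : (acc ++ [s]).any (isEq catalog) = true := by simp [List.any_append, hacc]
        simp [this, hkb]
      | false =>
        cases heq : isEq catalog s with
        | true =>
          have : (acc ++ [s]).any (isEq catalog) = true := by simp [List.any_append, heq]
          simp [this, keepFirst, heq]
        | false =>
          have : (acc ++ [s]).any (isEq catalog) = false := by simp [List.any_append, hacc, heq]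
          simp [this, keepFirst, heq, hkb]
    · have hkb' : (PySem.Set.contains preserveClasses (classOfSym s catalog)
          || PySem.Set.contains safeEtfs (PySem.Str.upper s)) = false := by
        simpa [keepBase] using hkb
      simp only [hkb', Bool.false_eq_true, if_false]
      cases hacc : acc.any (isEq catalog) with
      | true =>
        have hcnt : ¬ ((acc.filter (fun s => classOfSym s catalog == "public_equity")).length < 1) := by
          rw [countLt_iff]; simp [hacc]
        cases heq : isEq catalog s with
        | true =>
          have hcond : ((classOfSym s catalog == "public_equity")
              && decide ((acc.filter (fun s => classOfSym s catalog == "public_equity")).length < 1)) = false := by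
            simp [hcnt]
          simp only [hcond, Bool.false_eq_true, if_false]
          rw [ih acc]
          simp [hacc, hkb]
        | false =>
          have heq' : (classOfSym s catalog == "public_equity") = false := heq
          simp only [heq', Bool.false_and, Bool.false_eq_true, if_false]
          rw [ih acc]
          simp [hacc, hkb]
      | false =>
        have hcnt : ((acc.filter (fun s => classOfSym s catalog == "public_equity")).length < 1) := by
          rw [countLt_iff]; exact hacc
        cases heq : isEq catalog s with
        | true =>
          have heq' : (classOfSym s catalog == "public_equity") = true := heq
          have hcond : ((classOfSym s catalog == "public_equity")
              && decide ((acc.filter (fun s => classOfSym s catalog == "public_equity")).length < 1)) = true := by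
            simp [heq', hcnt]
          have hany : (acc ++ [s]).any (isEq catalog) = true := by simp [List.any_append, heq]
          simp only [hcond, if_true]
          rw [ih (acc ++ [s])]
          simp [hany, keepFirst, heq]
        | false =>
          have heq' : (classOfSym s catalog == "public_equity") = false := heq
          simp only [heq', Bool.false_and, Bool.false_eq_true, if_false]
          rw [ih acc]
          simp [hacc, keepFirst, heq, hkb]

-- the index built by B looks up to the FIRST catalog entry with the given upper-cased symbol
lemma get?_foldl_setdefault (key : List (String × String) → String) (val : List (String × String) → String) :
    ∀ (assets : List (List (String × String))) (d : PySem.Dict String String) (u : String),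
      (assets.foldl (fun t a => t.setdefault (key a) (val a)) d).get? u
        = ((d.get? u).or ((assets.find? (fun a => key a == u)).map val)) := by
  intro assets
  induction assets with
  | nil => intro d u; simp
  | cons a rest ih =>
    intro d u
    rw [List.foldl_cons, ih]
    by_cases hk : key a = u
    · subst hk
      rw [List.find?_cons_of_pos (by simp)]
      rw [PySem.Dict.get?_setdefault_self]
      cases hd : d.get? (key a) <;> simp
    · rw [List.find?_cons_of_neg (by simp [hk])]
      rw [PySem.Dict.get?_setdefault_of_ne d (val a) (Ne.symm hk)]

-- the fallback if-chain of A equals a lookup in B's _FALLBACK dict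
lemma fallback_eq (u : String) :
    (if PySem.Set.contains (PySem.Set.ofList ["DBC", "GSG"]) u then "commodities"
     else if PySem.Set.contains (PySem.Set.ofList ["GLD", "IAU"]) u then "commodities"
     else if PySem.Set.contains (PySem.Set.ofList ["SPY", "VTI", "QQQ", "DIA", "IWM", "VEA", "VXUS", "VWO", "EFA"]) u then "equity_us"
     else if PySem.Set.contains (PySem.Set.ofList ["TLT", "IEF"]) u then "bonds_tsy"
     else if PySem.Set.contains (PySem.Set.ofList ["BND", "LQD"]) u then "bonds_ig"
     else if PySem.Set.contains (PySem.Set.ofList ["MUB"]) u then "munis"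
     else if PySem.Set.contains (PySem.Set.ofList ["BIL", "SHY"]) u then "cash"
     else "unknown")
    = PySem.Dict.getD fallbackD u "unknown" := by
  have e1 : PySem.Set.ofList ["DBC", "GSG"] = ["DBC", "GSG"] := by decide
  have e2 : PySem.Set.ofList ["GLD", "IAU"] = ["GLD", "IAU"] := by decide
  have e3 : PySem.Set.ofList ["SPY", "VTI", "QQQ", "DIA", "IWM", "VEA", "VXUS", "VWO", "EFA"] = ["SPY", "VTI", "QQQ", "DIA", "IWM", "VEA", "VXUS", "VWO", "EFA"] := by decide
  have e4 : PySem.Set.ofList ["TLT", "IEF"] = ["TLT", "IEF"] := by decide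
  have e5 : PySem.Set.ofList ["BND", "LQD"] = ["BND", "LQD"] := by decide
  have e6 : PySem.Set.ofList ["MUB"] = ["MUB"] := by decide
  have e7 : PySem.Set.ofList ["BIL", "SHY"] = ["BIL", "SHY"] := by decide
  by_cases h1 : ("DBC" : String) = u
  · subst h1; decide
  by_cases h2 : ("GSG" : String) = u
  · subst h2; decide
  by_cases h3 : ("GLD" : String) = u
  · subst h3; decide
  by_cases h4 : ("IAU" : String) = u
  · subst h4; decide
  by_cases h5 : ("SPY" : String) = u
  · subst h5; decide
  by_cases h6 : ("VTI" : String) = u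
  · subst h6; decide
  by_cases h7 : ("QQQ" : String) = u
  · subst h7; decide
  by_cases h8 : ("DIA" : String) = u
  · subst h8; decide
  by_cases h9 : ("IWM" : String) = u
  · subst h9; decide
  by_cases h10 : ("VEA" : String) = u
  · subst h10; decide
  by_cases h11 : ("VXUS" : String) = u
  · subst h11; decide
  by_cases h12 : ("VWO" : String) = u
  · subst h12; decide
  by_cases h13 : ("EFA" : String) = u
  · subst h13; decide
  by_cases h14 : ("TLT" : String) = u
  · subst h14; decide
  by_cases h15 : ("IEF" : String) = u
  · subst h15; decide
  by_cases h16 : ("BND" : String) = u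
  · subst h16; decide
  by_cases h17 : ("LQD" : String) = u
  · subst h17; decide
  by_cases h18 : ("MUB" : String) = u
  · subst h18; decide
  by_cases h19 : ("BIL" : String) = u
  · subst h19; decide
  by_cases h20 : ("SHY" : String) = u
  · subst h20; decide
  simp only [fallbackD, PySem.Dict.getD_eq_get?_getD, PySem.Dict.get?_mk_cons,
    PySem.Set.contains_eq_listContains, e1, e2, e3, e4, e5, e6, e7]
  simp [h1, h2, h3, h4, h5, h6, h7, h8, h9, h10, h11, h12, h13, h14, h15, h16, h17, h18, h19, h20,
    Ne.symm h1, Ne.symm h2, Ne.symm h3, Ne.symm h4, Ne.symm h5, Ne.symm h6, Ne.symm h7, Ne.symm h8,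
    Ne.symm h9, Ne.symm h10, Ne.symm h11, Ne.symm h12, Ne.symm h13, Ne.symm h14, Ne.symm h15,
    Ne.symm h16, Ne.symm h17, Ne.symm h18, Ne.symm h19, Ne.symm h20,
    show (PySem.Dict.mk ([] : List (String × String))).get? u = none from rfl]

-- B's class lookup computes A's _class_of_symbol
lemma classLookup_eq (catalog : List (String × List (List (String × String)))) (sym : String) :
    classLookup (buildTable catalog) sym = classOfSym sym catalog := by
  unfold classLookup buildTable classOfSym
  simp only [get?_foldl_setdefault
      (fun a => PySem.Str.upper (PySem.Dict.getD (PySem.Dict.mk a) "symbol" ""))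
      (fun a => PySem.Dict.getD (PySem.Dict.mk a) "class" "unknown"),
    PySem.Dict.get?_empty, Option.none_or]
  cases hf : (PySem.Dict.getD (PySem.Dict.mk catalog) "assets" []).find?
      (fun a => PySem.Str.upper (PySem.Dict.getD (PySem.Dict.mk a) "symbol" "") == PySem.Str.upper sym) with
  | some a => simp
  | none => exact (fallback_eq (PySem.Str.upper sym)).symm

-- B's branch test equals keepBase (set literals vs list literals)
lemma keepBase_eq (catalog : List (String × List (List (String × String)))) (s : String) :
    (["tbills", "treasury_short", "corporate_bond", "tax_eff_muni"].contains (classLookup (buildTable catalog) s)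
      || ["BIL", "SHY", "BND", "LQD", "MUB", "GOVT"].contains (PySem.Str.upper s)) = keepBase catalog s := by
  rw [classLookup_eq]
  unfold keepBase
  have h1 : preserveClasses = ["tbills", "treasury_short", "corporate_bond", "tax_eff_muni"] := by decide
  have h2 : safeEtfs = ["BIL", "SHY", "BND", "LQD", "MUB", "GOVT"] := by decide
  rw [h1, h2, PySem.Set.contains_eq_listContains, PySem.Set.contains_eq_listContains]

-- characterisation of B's flagged fold
lemma foldB_eq (catalog : List (String × List (List (String × String)))) :
    ∀ (l : List String) (acc : List String) (b : Bool),
      l.foldl (fun (st : List String × Bool) sym =>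
        let c := classLookup (buildTable catalog) sym
        if ["tbills", "treasury_short", "corporate_bond", "tax_eff_muni"].contains c
            || ["BIL", "SHY", "BND", "LQD", "MUB", "GOVT"].contains (PySem.Str.upper sym) then
          (st.1 ++ [sym], st.2 || (c == "public_equity"))
        else if c == "public_equity" && !st.2 then
          (st.1 ++ [sym], true)
        else
          st) (acc, b)
      = (acc ++ (if b then l.filter (keepBase catalog) else keepFirst catalog l), b || l.any (isEq catalog)) := by
  intro l
  induction l with
  | nil => intro acc b; cases b <;> simp [keepFirst]
  | cons s r ih =>
    intro acc b
    rw [List.foldl_cons]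
    have hcls : classLookup (buildTable catalog) s = classOfSym s catalog := classLookup_eq catalog s
    have hiso : (classOfSym s catalog == "public_equity") = isEq catalog s := rfl
    by_cases hkb : keepBase catalog s
    · have hc : (["tbills", "treasury_short", "corporate_bond", "tax_eff_muni"].contains (classLookup (buildTable catalog) s)
          || ["BIL", "SHY", "BND", "LQD", "MUB", "GOVT"].contains (PySem.Str.upper s)) = true := by
        rw [keepBase_eq]; exact hkb
      simp only [hc, if_true]
      rw [hcls, hiso]
      rw [ih]
      cases b with
      | true =>
        cases heq : isEq catalog s <;> simp [hkb, heq]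
      | false =>
        cases heq : isEq catalog s with
        | true => simp [keepFirst, heq]
        | false => simp [keepFirst, heq, hkb]
    · have hc : (["tbills", "treasury_short", "corporate_bond", "tax_eff_muni"].contains (classLookup (buildTable catalog) s)
          || ["BIL", "SHY", "BND", "LQD", "MUB", "GOVT"].contains (PySem.Str.upper s)) = false := by
        rw [keepBase_eq]; simpa using hkb
      simp only [hc, Bool.false_eq_true, if_false]
      rw [hcls, hiso]
      cases heq : isEq catalog s with
      | true =>
        cases b with
        | true =>
          simp only [Bool.not_true, Bool.and_false, Bool.false_eq_true, if_false]
          rw [ih]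
          simp [hkb, heq]
        | false =>
          simp only [Bool.not_false, Bool.and_true, if_true]
          rw [ih]
          simp [keepFirst, heq]
      | false =>
        simp only [Bool.false_and, Bool.false_eq_true, if_false]
        rw [ih]
        cases b with
        | true => simp [hkb, heq]
        | false => simp [keepFirst, heq, hkb]

-- ===== VERDICT (by name: the statement is the Claim_ definition above) =====
theorem filter_preserve_universe_py_spec : Claim_equal_filter_preserve_universe_py := by
  intro symbols catalog _
  show filter_preserve_universe_py symbols catalog = filter_preserve_universe_py_alt symbols catalog
  unfold filter_preserve_universe_py filter_preserve_universe_py_alt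
  dsimp only
  rw [foldA_eq catalog symbols [], foldB_eq catalog symbols [] false]
  simp
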